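-- pv_equiv track=rewrite | github.com/jburchel/mobilize-django | mobilize/core/dashboard_widgets.py | organize_widgets_by_row
-- ===== SOURCE A (Python) =====
-- def organize_widgets_by_row(widgets):
--     """
--     Organize widgets into rows based on their grid positions and column widths.
--
--     Args:
--         widgets: List of widget configurations
--
--     Returns:
--         List of rows, each containing widgets that fit together
--     """
--     if not widgets:
--         return []
--
--     # Sort widgets by row first, then by position within row
--     sorted_widgets = sorted(
--         widgets, key=lambda w: (w.get("row", 0), w.get("position", 0))
--     )
--
--     # Group widgets by row
--     rows = {}
--     for widget in sorted_widgets: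
--         row_num = widget.get("row", 0)
--         if row_num not in rows:
--             rows[row_num] = []
--         rows[row_num].append(widget)
--
--     # Convert to list of rows ordered by row number
--     return [rows[row_num] for row_num in sorted(rows.keys())]
-- ===== SOURCE B (Python) =====
-- def organize_widgets_by_row(widgets):
--     """Group widgets into row buckets in one pass, then sort each bucket by position."""
--     buckets = {}
--     for w in widgets:
--         buckets.setdefault(w.get("row", 0), []).append(w)
--     return [
--         sorted(buckets[r], key=lambda w: w.get("position", 0))
--         for r in sorted(buckets)
--     ]
-- ===== Notes on version B (the rewrite author's own statement) =====
-- stated objective: alternative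
-- what changed: A globally sorts all widgets by the composite (row, position) key and then groups the sorted list into row buckets; B groups the unsorted widgets into row buckets in one pass and then stably sorts each bucket by position only, sorting the row keys separately.
import Mathlib
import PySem

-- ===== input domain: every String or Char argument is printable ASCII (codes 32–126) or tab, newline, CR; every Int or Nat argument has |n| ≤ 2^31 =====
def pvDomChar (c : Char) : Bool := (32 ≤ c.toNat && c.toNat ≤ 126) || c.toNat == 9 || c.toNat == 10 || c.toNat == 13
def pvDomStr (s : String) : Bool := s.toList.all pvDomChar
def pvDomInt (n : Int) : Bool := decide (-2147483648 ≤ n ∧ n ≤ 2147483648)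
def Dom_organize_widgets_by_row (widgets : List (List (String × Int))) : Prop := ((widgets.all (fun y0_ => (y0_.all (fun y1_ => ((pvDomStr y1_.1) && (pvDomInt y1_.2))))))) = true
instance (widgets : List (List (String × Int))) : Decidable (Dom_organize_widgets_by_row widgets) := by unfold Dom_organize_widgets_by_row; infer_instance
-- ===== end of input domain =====

-- B groups the widgets into row buckets in one pass and then sorts each bucket by
-- position, instead of A's global sort by the composite (row, position) key followed
-- by grouping; same results, similar cost (objective: alternative decomposition).

-- shared helper: widget.get(k, 0) on a widget dict (association list)
def wget (w : List (String × Int)) (k : String) : Int :=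
  (PySem.Dict.ofList w).getD k 0

-- ===== PORT A =====
def organize_widgets_by_row (widgets : List (List (String × Int))) : List (List (List (String × Int))) :=
  match widgets with
  | [] => []                                  -- if not widgets: return []
  | _ =>
    -- sorted_widgets = sorted(widgets, key=lambda w: (w.get("row",0), w.get("position",0)))
    let sorted_widgets := PySem.List.sorted2 widgets (fun w => wget w "row") (fun w => wget w "position")
    -- rows = {}; for widget in sorted_widgets: if row_num not in rows: rows[row_num] = []; rows[row_num].append(widget)
    let rows := sorted_widgets.foldl (fun d widget =>
      let row_num := wget widget "row"
      let d1 := if d.contains row_num then d else d.insert row_num []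
      d1.insert row_num (d1.getD row_num [] ++ [widget])) PySem.Dict.empty
    -- return [rows[row_num] for row_num in sorted(rows.keys())]
    (PySem.List.sorted rows.keys (fun x => x)).map (fun row_num => rows.getD row_num [])

-- ===== PORT B =====
def organize_widgets_by_row_alt (widgets : List (List (String × Int))) : List (List (List (String × Int))) :=
  -- buckets = {}; for w in widgets: buckets.setdefault(w.get("row",0), []).append(w)
  let buckets := widgets.foldl (fun d w => d.modify (wget w "row") [] (· ++ [w])) PySem.Dict.empty
  -- [sorted(buckets[r], key=lambda w: w.get("position",0)) for r in sorted(buckets)]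
  (PySem.List.sorted buckets.keys (fun x => x)).map
    (fun r => PySem.List.sorted (buckets.getD r []) (fun w => wget w "position"))

-- ===== PRECONDITION & SPEC =====
def Spec_organize_widgets_by_row (widgets : List (List (String × Int))) (out : List (List (List (String × Int)))) : Prop := out = organize_widgets_by_row_alt widgets
instance (widgets : List (List (String × Int))) (out : List (List (List (String × Int)))) : Decidable (Spec_organize_widgets_by_row widgets out) := by unfold Spec_organize_widgets_by_row; infer_instance

-- ===== CLAIM (what is proved, stated in full; the proofs are below) =====
def Claim_equal_organize_widgets_by_row : Prop := ∀ (widgets : List (List (String × Int))), Dom_organize_widgets_by_row widgets → Spec_organize_widgets_by_row widgets (organize_widgets_by_row widgets)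

-- ===== LEMMAS AND PROOFS =====

-- abbreviations for the two key functions and the two comparison predicates
def k1 (w : List (String × Int)) : Int := wget w "row"
def k2 (w : List (String × Int)) : Int := wget w "position"
def lt12 (a b : List (String × Int)) : Bool :=
  decide (k1 a < k1 b) || (!decide (k1 b < k1 a) && decide (k2 a < k2 b))
def lt2 (a b : List (String × Int)) : Bool := decide (k2 a < k2 b)

theorem sorted2_eq (xs : List (List (String × Int))) :
    PySem.List.sorted2 xs (fun w => wget w "row") (fun w => wget w "position")
      = xs.foldl (fun acc x => PySem.List.insertBy lt12 x acc) [] := rfl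

theorem sorted_k2_eq (xs : List (List (String × Int))) :
    PySem.List.sorted xs (fun w => wget w "position")
      = xs.foldl (fun acc x => PySem.List.insertBy lt2 x acc) [] := rfl

theorem lt12_iff (a b : List (String × Int)) :
    lt12 a b = true ↔ (k1 a < k1 b ∨ (¬ k1 b < k1 a ∧ k2 a < k2 b)) := by
  simp [lt12]

theorem lt12_eq_false_iff (a b : List (String × Int)) :
    lt12 a b = false ↔ ¬ (k1 a < k1 b ∨ (¬ k1 b < k1 a ∧ k2 a < k2 b)) := by
  rw [← lt12_iff]; exact Bool.not_eq_true _ |>.symm ▸ Iff.rfl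

theorem lt2_iff (a b : List (String × Int)) : lt2 a b = true ↔ k2 a < k2 b := by simp [lt2]

theorem lt2_eq_false_iff (a b : List (String × Int)) : lt2 a b = false ↔ ¬ k2 a < k2 b := by
  simp [lt2]

theorem lt12_irrefl (x : List (String × Int)) : lt12 x x = false := by
  rw [lt12_eq_false_iff]; omega

theorem lt12_false_of {x y z : List (String × Int)}
    (hxy : lt12 x y = true) (hzy : lt12 z y = false) : lt12 z x = false := by
  rw [lt12_iff] at hxy; rw [lt12_eq_false_iff] at hzy ⊢; omega

theorem lt2_of_lt12_of_not {x y z : List (String × Int)}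
    (hxy : lt12 x y = true) (hzy : lt12 z y = false) (hk : k1 z = k1 x) : lt2 x z = true := by
  rw [lt12_iff] at hxy; rw [lt12_eq_false_iff] at hzy; rw [lt2_iff]; omega

theorem lt2_false_of {x y : List (String × Int)}
    (hxy : lt12 x y = false) (hk : k1 x = k1 y) : lt2 x y = false := by
  rw [lt12_eq_false_iff] at hxy; rw [lt2_eq_false_iff]; omega

theorem lt12_asymm {x y : List (String × Int)} (hxy : lt12 x y = true) : lt12 y x = false := by
  rw [lt12_iff] at hxy; rw [lt12_eq_false_iff]; omega

theorem insertBy_nil (before : List (String × Int) → List (String × Int) → Bool)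
    (x : List (String × Int)) : PySem.List.insertBy before x [] = [x] := rfl

theorem insertBy_cons (before : List (String × Int) → List (String × Int) → Bool)
    (x y : List (String × Int)) (ys : List (List (String × Int))) :
    PySem.List.insertBy before x (y :: ys)
      = if before x y then x :: y :: ys else y :: PySem.List.insertBy before x ys := rfl

-- the running accumulator of an insertion sort never has a later element strictly before an earlier one
theorem pairwise_insertBy (x : List (String × Int)) (l : List (List (String × Int)))
    (h : l.Pairwise (fun a b => lt12 b a = false)) :
    (PySem.List.insertBy lt12 x l).Pairwise (fun a b => lt12 b a = false) := by
  induction l with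
  | nil => simp [insertBy_nil, List.pairwise_cons]
  | cons y ys ih =>
    rw [List.pairwise_cons] at h
    obtain ⟨hy, hys⟩ := h
    rw [insertBy_cons]
    by_cases hxy : lt12 x y = true
    · rw [if_pos hxy]
      refine List.Pairwise.cons ?_ (List.Pairwise.cons hy hys)
      intro b hb
      rcases List.mem_cons.mp hb with rfl | hb
      · exact lt12_asymm hxy
      · exact lt12_false_of hxy (hy b hb)
    · rw [Bool.not_eq_true] at hxy
      rw [if_neg (by simp [hxy])]
      refine List.Pairwise.cons ?_ (ih hys)
      intro b hb
      rcases (PySem.List.mem_insertBy lt12 x b ys).mp hb with rfl | hb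
      · exact hxy
      · exact hy b hb

-- inserting into a sorted accumulator commutes with filtering one row class,
-- turning the composite comparison into the position-only comparison
theorem filter_insertBy (r : Int) (x : List (String × Int)) (l : List (List (String × Int)))
    (h : l.Pairwise (fun a b => lt12 b a = false)) :
    (PySem.List.insertBy lt12 x l).filter (fun w => k1 w == r)
      = if k1 x == r then PySem.List.insertBy lt2 x (l.filter (fun w => k1 w == r))
        else l.filter (fun w => k1 w == r) := by
  induction l with
  | nil =>
    by_cases hx : (k1 x == r) = true
    · simp [insertBy_nil, hx]
    · rw [Bool.not_eq_true] at hx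
      simp [insertBy_nil, hx]
  | cons y ys ih =>
    rw [List.pairwise_cons] at h
    obtain ⟨hy, hys⟩ := h
    rw [insertBy_cons]
    by_cases hxy : lt12 x y = true
    · rw [if_pos hxy]
      by_cases hx : (k1 x == r) = true
      · rw [if_pos hx, List.filter_cons_of_pos (by simpa using hx)]
        rcases hf : (y :: ys).filter (fun w => k1 w == r) with _ | ⟨z, t⟩
        · rw [insertBy_nil]
        · have hzmem : z ∈ (y :: ys).filter (fun w => k1 w == r) := by
            rw [hf]; exact List.mem_cons_self
          have hz₁ : z ∈ y :: ys := List.mem_of_mem_filter hzmem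
          have hz₂ : (k1 z == r) = true := by simpa using List.of_mem_filter hzmem
          have hzy : lt12 z y = false := by
            rcases List.mem_cons.mp hz₁ with rfl | hz
            · exact lt12_irrefl z
            · exact hy z hz
          have hlt : lt2 x z = true := by
            apply lt2_of_lt12_of_not hxy hzy
            have h1 := beq_iff_eq.mp hz₂
            have h2 := beq_iff_eq.mp hx
            omega
          rw [insertBy_cons, if_pos hlt]
      · rw [Bool.not_eq_true] at hx
        rw [if_neg (by simp [hx]), List.filter_cons_of_neg (by simp [hx])]
    · rw [Bool.not_eq_true] at hxy
      rw [if_neg (by simp [hxy]), List.filter_cons, ih hys]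
      by_cases hyp : (k1 y == r) = true
      · by_cases hx : (k1 x == r) = true
        · have hlt : lt2 x y = false := by
            apply lt2_false_of hxy
            have h1 := beq_iff_eq.mp hyp
            have h2 := beq_iff_eq.mp hx
            omega
          rw [if_pos (by simpa using hyp), if_pos hx, if_pos hx,
            List.filter_cons_of_pos (by simpa using hyp), insertBy_cons,
            if_neg (by simp [hlt])]
        · rw [Bool.not_eq_true] at hx
          simp [hyp, hx]
      · rw [Bool.not_eq_true] at hyp
        by_cases hx : (k1 x == r) = true <;>
          simp [hyp, hx]

theorem filter_foldl_insertBy (r : Int) (xs acc : List (List (String × Int)))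
    (h : acc.Pairwise (fun a b => lt12 b a = false)) :
    (xs.foldl (fun a x => PySem.List.insertBy lt12 x a) acc).filter (fun w => k1 w == r)
      = (xs.filter (fun w => k1 w == r)).foldl (fun a x => PySem.List.insertBy lt2 x a)
          (acc.filter (fun w => k1 w == r)) := by
  induction xs generalizing acc with
  | nil => simp
  | cons x xs ih =>
    simp only [List.foldl_cons, List.filter_cons]
    rw [ih _ (pairwise_insertBy x acc h), filter_insertBy r x acc h]
    by_cases hx : (k1 x == r) = true
    · simp [hx]
    · rw [Bool.not_eq_true] at hx
      simp [hx]

-- the r-row class of A's globally sorted list is the position-sort of the r-row class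
theorem filter_sorted2 (xs : List (List (String × Int))) (r : Int) :
    (PySem.List.sorted2 xs (fun w => wget w "row") (fun w => wget w "position")).filter
        (fun w => k1 w == r)
      = PySem.List.sorted (xs.filter (fun w => k1 w == r)) (fun w => wget w "position") := by
  rw [sorted2_eq, sorted_k2_eq, filter_foldl_insertBy r xs [] List.Pairwise.nil]
  simp

-- A's grouping step (if-absent-then-[], then append) IS the modify-grouping step
theorem stepA_eq_modify (d : PySem.Dict Int (List (List (String × Int))))
    (w : List (String × Int)) :
    (let d1 := if d.contains (k1 w) then d else d.insert (k1 w) []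
     d1.insert (k1 w) (d1.getD (k1 w) [] ++ [w]))
      = d.modify (k1 w) [] (· ++ [w]) := by
  by_cases hc : d.contains (k1 w) = true
  · simp [hc, PySem.Dict.modify]
  · rw [Bool.not_eq_true] at hc
    simp only [hc, Bool.false_eq_true, if_false, PySem.Dict.modify]
    rw [PySem.Dict.getD_insert_self, PySem.Dict.insert_insert_self,
      PySem.Dict.getD_of_not_contains d _ hc]

-- the grouping fold's bucket at r is exactly the r-row class, in traversal order
theorem getD_groupfold (l : List (List (String × Int))) (r : Int) :
    ((l.foldl (fun d w => d.modify (k1 w) [] (· ++ [w])) PySem.Dict.empty).getD r [])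
      = l.filter (fun w => k1 w == r) := by
  have hm : l.foldl (fun d w => d.modify (k1 w) [] (· ++ [w])) PySem.Dict.empty
      = (l.map (fun w => (k1 w, w))).foldl
          (fun d p => d.modify p.1 [] (· ++ [p.2])) PySem.Dict.empty := by
    rw [List.foldl_map]
  rw [hm, PySem.Dict.getD_foldl_modify_append, PySem.Dict.getD_empty]
  simp [List.filter_map, Function.comp_def]

theorem keys_groupfold (l : List (List (String × Int))) :
    (l.foldl (fun d w => d.modify (k1 w) [] (· ++ [w])) PySem.Dict.empty).keys
      = PySem.Set.update (PySem.Dict.empty (κ := Int) (ν := List (List (String × Int)))).keys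
          (l.map k1) :=
  PySem.Dict.keys_foldl_modify_key l k1 [] (fun _ w v => v ++ [w]) PySem.Dict.empty

theorem nodup_keys_groupfold (l : List (List (String × Int))) :
    (l.foldl (fun d w => d.modify (k1 w) [] (· ++ [w])) PySem.Dict.empty).keys.Nodup :=
  PySem.Dict.nodup_keys_foldl_modify_key l k1 [] (fun _ w v => v ++ [w]) PySem.Dict.empty
    (by simp [PySem.Dict.keys_empty])

-- the two folds (over the sorted list and over the original) have the same sorted key list
theorem sorted_keys_eq (widgets : List (List (String × Int))) :
    PySem.List.sorted
        ((PySem.List.sorted2 widgets (fun w => wget w "row") (fun w => wget w "position")).foldl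
          (fun d w => d.modify (k1 w) [] (· ++ [w])) PySem.Dict.empty).keys (fun x => x)
      = PySem.List.sorted
          (widgets.foldl (fun d w => d.modify (k1 w) [] (· ++ [w])) PySem.Dict.empty).keys
          (fun x => x) := by
  apply PySem.List.sorted_eq_sorted_of_perm _ _ _ (fun a b h => h)
  rw [List.perm_ext_iff_of_nodup (nodup_keys_groupfold _) (nodup_keys_groupfold _)]
  intro a
  rw [keys_groupfold, keys_groupfold]
  simp only [PySem.Set.mem_update, List.mem_map]
  constructor
  · rintro (h | ⟨w, hw, rfl⟩)
    · exact Or.inl h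
    · exact Or.inr ⟨w, (PySem.List.sorted2_perm ..).mem_iff.mp hw, rfl⟩
  · rintro (h | ⟨w, hw, rfl⟩)
    · exact Or.inl h
    · exact Or.inr ⟨w, (PySem.List.sorted2_perm ..).mem_iff.mpr hw, rfl⟩

-- ===== VERDICT (by name: the statement is the Claim_ definition above) =====
theorem organize_widgets_by_row_spec : Claim_equal_organize_widgets_by_row := by
  intro widgets _
  unfold Spec_organize_widgets_by_row organize_widgets_by_row organize_widgets_by_row_alt
  match widgets with
  | [] => rfl
  | w :: ws =>
    show (PySem.List.sorted _ _).map _ = (PySem.List.sorted _ _).map _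
    have hstep : (fun (d : PySem.Dict Int (List (List (String × Int)))) widget =>
        let row_num := wget widget "row"
        let d1 := if d.contains row_num then d else d.insert row_num []
        d1.insert row_num (d1.getD row_num [] ++ [widget]))
        = fun d widget => d.modify (k1 widget) [] (· ++ [widget]) := by
      funext d widget
      exact stepA_eq_modify d widget
    rw [hstep]
    have hwget : (fun (d : PySem.Dict Int (List (List (String × Int)))) widget =>
        d.modify (wget widget "row") [] (· ++ [widget]))
        = fun d widget => d.modify (k1 widget) [] (· ++ [widget]) := rfl
    rw [hwget, sorted_keys_eq (w :: ws)]
    apply List.map_congr_left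
    intro r _
    rw [getD_groupfold, getD_groupfold, ← filter_sorted2]
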